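-- pv_equiv track=rewrite | github.com/aronweiler/assistant | src/integrations/gitlab/gitlab_issue_retriever.py | _extract_findings_from_issue
-- ===== SOURCE A (Python) =====
-- def _extract_findings_from_issue(issue: str) -> dict:
--     issue_lines = issue.splitlines()
--
--     tmp_dict = {}
--     state = 0
--     count = 0
--     for line in issue_lines:
--         if state == 0:
--             if line.startswith('1.'):
--                 state = 1
--                 tmp_dict[count] = [line]
--         elif state == 1:
--             if line.startswith('1.'):
--                 count += 1
--                 tmp_dict[count] = [line]
--             else:
--                 tmp_dict[count].append(line)
--
--     findings = {item_number: "\n".join(text) for item_number, text in tmp_dict.items()}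
--
--     return findings
-- ===== SOURCE B (Python) =====
-- def _extract_findings_from_issue(issue: str) -> dict:
--     lines = issue.splitlines()
--     idxs = [i for i, line in enumerate(lines) if line.startswith('1.')]
--     findings = {}
--     for j, start in enumerate(idxs):
--         end = idxs[j + 1] if j + 1 < len(idxs) else len(lines)
--         findings[j] = "\n".join(lines[start:end])
--     return findings
-- ===== Notes on version B (the rewrite author's own statement) =====
-- stated objective: alternative
-- what changed: Replaces the stateful dict-accumulation loop (state flag, running count, append-to-last-entry) by an index-then-slice decomposition: one scan collects the indices of lines starting with '1.', then each block is a slice between consecutive collected indices joined once.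
import Mathlib
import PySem

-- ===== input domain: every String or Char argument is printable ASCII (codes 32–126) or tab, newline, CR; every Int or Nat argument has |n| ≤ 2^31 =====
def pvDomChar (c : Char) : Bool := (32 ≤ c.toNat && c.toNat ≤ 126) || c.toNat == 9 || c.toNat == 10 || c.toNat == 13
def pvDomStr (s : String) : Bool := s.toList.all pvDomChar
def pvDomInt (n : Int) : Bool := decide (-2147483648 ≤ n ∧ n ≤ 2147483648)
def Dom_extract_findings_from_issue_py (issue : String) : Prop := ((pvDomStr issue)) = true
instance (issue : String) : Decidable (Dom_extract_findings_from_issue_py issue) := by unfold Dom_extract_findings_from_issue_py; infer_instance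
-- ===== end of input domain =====

-- B replaces A's stateful accumulation loop by an index-then-slice decomposition (objective: alternative, same cost).

-- ===== PORT A =====
-- one step of A's for-loop; state = (tmp_dict, state, count)
def pvStepA (st : PySem.Dict Int (List String) × Int × Int) (line : String) :
    PySem.Dict Int (List String) × Int × Int :=
  if st.2.1 == 0 then
    if PySem.Str.startswith line "1." then (st.1.insert st.2.2 [line], 1, st.2.2) else st
  else if st.2.1 == 1 then
    if PySem.Str.startswith line "1." then
      (st.1.insert (st.2.2 + 1) [line], 1, st.2.2 + 1)
    else
      -- tmp_dict[count].append(line): key count is always present in state 1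
      (st.1.modify st.2.2 [] (fun t => t ++ [line]), 1, st.2.2)
  else st

def extract_findings_from_issue_py (issue : String) : List (Int × String) :=
  let issue_lines := PySem.Str.splitlines issue
  let r := issue_lines.foldl pvStepA (PySem.Dict.empty, 0, 0)
  r.1.items.map (fun p => (p.1, PySem.Str.join "\n" p.2))

-- ===== PORT B =====
def extract_findings_from_issue_py_alt (issue : String) : List (Int × String) :=
  let lines := PySem.Str.splitlines issue
  let idxs := (PySem.List.enumerate lines).filterMap
    (fun p => if PySem.Str.startswith p.2 "1." then some p.1 else none)
  (PySem.List.enumerate idxs).map (fun q =>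
    -- end = idxs[j+1] if j+1 < len(idxs) else len(lines)
    let stop := (PySem.List.pyGet? idxs (q.1 + 1)).getD (lines.length : Int)
    (q.1, PySem.Str.join "\n" (PySem.List.slice lines (some q.2) (some stop))))

-- ===== PRECONDITION & SPEC =====
def Spec_extract_findings_from_issue_py (issue : String) (out : List (Int × String)) : Prop := out = extract_findings_from_issue_py_alt issue
instance (issue : String) (out : List (Int × String)) : Decidable (Spec_extract_findings_from_issue_py issue out) := by unfold Spec_extract_findings_from_issue_py; infer_instance

-- ===== CLAIM (what is proved, stated in full; the proofs are below) =====
def Claim_equal_extract_findings_from_issue_py : Prop := ∀ (issue : String), Dom_extract_findings_from_issue_py issue → Spec_extract_findings_from_issue_py issue (extract_findings_from_issue_py issue)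

-- ===== LEMMAS AND PROOFS =====

def pvS (x : String) : Bool := PySem.Str.startswith x "1."

-- the common normal form: the list of blocks, each starting at a line that startswith "1."
def pvChunks (ls : List String) : List (List String) :=
  match ls with
  | [] => []
  | l :: rest =>
    if pvS l then
      (l :: rest.takeWhile (fun x => !pvS x)) ::
        pvChunks (rest.dropWhile (fun x => !pvS x))
    else pvChunks rest
termination_by ls.length
decreasing_by
  · simpa [Nat.lt_succ_iff] using List.length_dropWhile_le (fun x => !pvS x) rest
  · simp

def pvNum (c : Int) (chs : List (List String)) : List (Int × List String) :=
  match chs with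
  | [] => []
  | b :: bs => (c, b) :: pvNum (c + 1) bs

-- natural-number indices of the "1." lines
def pvIdxs (ls : List String) : List Nat :=
  match ls with
  | [] => []
  | l :: rest =>
    if pvS l then 0 :: (pvIdxs rest).map (· + 1)
    else (pvIdxs rest).map (· + 1)

-- B's computation in Nat normal form
def pvB (ls : List String) : List (Int × String) :=
  (pvIdxs ls).zipIdx.map (fun q =>
    ((q.2 : Int), PySem.Str.join "\n"
      ((ls.drop q.1).take ((((pvIdxs ls)[q.2 + 1]?).getD ls.length) - q.1))))

theorem pvChunks_nil : pvChunks [] = [] := by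
  unfold pvChunks; rfl

theorem pvChunks_dropWhile (ls : List String) :
    pvChunks (ls.dropWhile (fun x => !pvS x)) = pvChunks ls := by
  induction ls with
  | nil => rfl
  | cons l rest ih =>
    rw [List.dropWhile_cons]
    by_cases h : pvS l = true
    · simp [h]
    · simp only [Bool.not_eq_true] at h
      simp only [h, Bool.not_false, if_true]
      rw [ih]
      conv_rhs => rw [pvChunks]
      simp [h]

theorem pvNum_shift (c : Int) (chs : List (List String)) :
    pvNum (c + 1) chs = (pvNum c chs).map (fun p => (p.1 + 1, p.2)) := by
  induction chs generalizing c with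
  | nil => rfl
  | cons b bs ih => simp [pvNum, ih]

-- ---- A side ----

theorem pvContains_false (pre : List (Int × List String)) (x : Int)
    (h : ∀ k ∈ pre.map Prod.fst, ¬ k = x) : (PySem.Dict.mk pre).contains x = false := by
  simp only [PySem.Dict.contains_mk, List.any_eq_false, beq_iff_eq]
  intro p hp
  exact h p.1 (List.mem_map_of_mem hp)

theorem pvGet?_last (pre : List (Int × List String)) (c : Int) (blk : List String)
    (h : ∀ k ∈ pre.map Prod.fst, ¬ k = c) :
    (PySem.Dict.mk (pre ++ [(c, blk)])).get? c = some blk := by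
  induction pre with
  | nil => simp [PySem.Dict.get?_mk_cons]
  | cons p ps ih =>
    rw [List.cons_append, PySem.Dict.get?_mk_cons]
    have hp : ¬ (p.1 == c) = true := by
      simpa using h p.1 (by simp : p.1 ∈ (p :: ps).map Prod.fst)
    simp only [hp]
    exact ih (fun k hk => h k (by simp only [List.map_cons, List.mem_cons]; exact Or.inr hk))

theorem pvInsert_fresh (pre : List (Int × List String)) (x : Int) (v : List String)
    (h : ∀ k ∈ pre.map Prod.fst, ¬ k = x) :
    (PySem.Dict.mk pre).insert x v = PySem.Dict.mk (pre ++ [(x, v)]) := by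
  simp [PySem.Dict.insert, pvContains_false pre x h]

theorem pvInsert_last (pre : List (Int × List String)) (c : Int) (blk v : List String)
    (h : ∀ k ∈ pre.map Prod.fst, ¬ k = c) :
    (PySem.Dict.mk (pre ++ [(c, blk)])).insert c v = PySem.Dict.mk (pre ++ [(c, v)]) := by
  have hcont : (PySem.Dict.mk (pre ++ [(c, blk)])).contains c = true := by
    simp [PySem.Dict.contains_mk]
  simp only [PySem.Dict.insert, hcont, if_true]
  congr 1
  rw [List.map_append]
  congr 1
  · calc pre.map (fun p => if (p.1 == c) = true then (c, v) else p)
        = pre.map id := by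
          apply List.map_congr_left
          intro p hp
          have : ¬ (p.1 == c) = true := by
            simp only [beq_iff_eq]; exact h p.1 (List.mem_map_of_mem hp)
          simp [this]
      _ = pre := List.map_id pre
  · simp

theorem foldA_state1 (ls : List String) (pre : List (Int × List String)) (c : Int)
    (blk : List String) (h : ∀ k ∈ pre.map Prod.fst, k < c) :
    ls.foldl pvStepA (PySem.Dict.mk (pre ++ [(c, blk)]), 1, c) =
      (PySem.Dict.mk (pre ++ [(c, blk ++ ls.takeWhile (fun x => !pvS x))] ++
        pvNum (c + 1) (pvChunks (ls.dropWhile (fun x => !pvS x)))),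
       1, c + (ls.countP (fun x => pvS x) : Int)) := by
  induction ls generalizing pre c blk with
  | nil => simp [pvChunks_nil, pvNum]
  | cons l ls ih =>
    have hne : ∀ k ∈ pre.map Prod.fst, ¬ k = c := fun k hk => by
      have := h k hk; omega
    have hstep : pvStepA (PySem.Dict.mk (pre ++ [(c, blk)]), 1, c) l =
        if pvS l then ((PySem.Dict.mk (pre ++ [(c, blk)])).insert (c + 1) [l], 1, c + 1)
        else ((PySem.Dict.mk (pre ++ [(c, blk)])).modify c [] (fun t => t ++ [l]), 1, c) := by
      simp [pvStepA, pvS]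
    rw [List.foldl_cons, hstep]
    by_cases hl : pvS l = true
    · simp only [hl, if_true]
      have hfresh : ∀ k ∈ (pre ++ [(c, blk)]).map Prod.fst, ¬ k = c + 1 := by
        intro k hk
        simp only [List.map_append, List.mem_append, List.map_cons] at hk
        rcases hk with hk | hk
        · have := h k hk; omega
        · simp at hk; omega
      rw [pvInsert_fresh _ _ _ hfresh]
      rw [show pre ++ [(c, blk)] ++ [(c + 1, [l])] = (pre ++ [(c, blk)]) ++ [(c + 1, [l])] from rfl]
      rw [ih (pre ++ [(c, blk)]) (c + 1) [l] (by
        intro k hk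
        simp only [List.map_append, List.mem_append, List.map_cons] at hk
        rcases hk with hk | hk
        · have := h k hk; omega
        · simp at hk; omega)]
      rw [List.takeWhile_cons, List.dropWhile_cons, List.countP_cons]
      simp only [hl, Bool.not_true, if_false, Bool.false_eq_true]
      conv_rhs => rw [pvChunks]
      simp only [hl, if_true, pvNum, Prod.mk.injEq, PySem.Dict.mk.injEq]
      refine ⟨?_, trivial, ?_⟩
      · simp [List.append_assoc]
      · push_cast
        ring
    · simp only [Bool.not_eq_true] at hl
      simp only [hl, Bool.false_eq_true, if_false]
      have hmod : (PySem.Dict.mk (pre ++ [(c, blk)])).modify c [] (fun t => t ++ [l]) =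
          PySem.Dict.mk (pre ++ [(c, blk ++ [l])]) := by
        unfold PySem.Dict.modify
        rw [show (PySem.Dict.mk (pre ++ [(c, blk)])).getD c [] = blk from by
          simp [PySem.Dict.getD, pvGet?_last pre c blk hne]]
        exact pvInsert_last pre c blk (blk ++ [l]) hne
      rw [hmod, ih pre c (blk ++ [l]) h]
      rw [List.takeWhile_cons, List.dropWhile_cons, List.countP_cons]
      simp [hl, List.append_assoc]

theorem foldA_items (ls : List String) :
    (ls.foldl pvStepA (PySem.Dict.empty, 0, 0)).1.items = pvNum 0 (pvChunks ls) := by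
  induction ls with
  | nil => simp [pvChunks_nil, pvNum, PySem.Dict.empty]
  | cons l ls ih =>
    have hstep : pvStepA (PySem.Dict.empty, 0, 0) l =
        if pvS l then (PySem.Dict.mk [((0 : Int), [l])], 1, 0) else (PySem.Dict.empty, 0, 0) := by
      simp [pvStepA, pvS, PySem.Dict.empty, PySem.Dict.insert, PySem.Dict.contains]
    rw [List.foldl_cons, hstep]
    by_cases hl : pvS l = true
    · simp only [hl, if_true]
      have := foldA_state1 ls [] 0 [l] (by simp)
      simp only [List.nil_append] at this
      rw [this]
      conv_rhs => rw [pvChunks]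
      simp [hl, pvNum]
    · simp only [Bool.not_eq_true] at hl
      simp only [hl, Bool.false_eq_true, if_false]
      rw [ih]
      conv_rhs => rw [pvChunks]
      simp [hl]

theorem portA_eq (issue : String) :
    extract_findings_from_issue_py issue =
      (pvNum 0 (pvChunks (PySem.Str.splitlines issue))).map
        (fun p => (p.1, PySem.Str.join "\n" p.2)) := by
  show (List.map (fun p => (p.1, PySem.Str.join "\n" p.2))
      ((List.foldl pvStepA (PySem.Dict.empty, 0, 0) (PySem.Str.splitlines issue)).1.items)) = _
  rw [foldA_items]

-- ---- B side ----

theorem enumerate_shift {α : Type} (ls : List α) (t : Int) :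
    PySem.List.enumerate ls (t + 1) = (PySem.List.enumerate ls t).map (fun p => (p.1 + 1, p.2)) := by
  induction ls generalizing t with
  | nil => simp [PySem.List.enumerate_nil]
  | cons x xs ih =>
    rw [PySem.List.enumerate_cons, PySem.List.enumerate_cons, ih (t + 1)]
    simp

theorem idxsOf_eq (ls : List String) :
    (PySem.List.enumerate ls).filterMap
      (fun p => if pvS p.2 then some p.1 else none) =
      (pvIdxs ls).map (fun n : Nat => (n : Int)) := by
  induction ls with
  | nil => simp [PySem.List.enumerate_nil, pvIdxs]
  | cons l rest ih =>
    rw [PySem.List.enumerate_cons, List.filterMap_cons]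
    rw [show (0 : Int) + 1 = 0 + 1 from rfl, enumerate_shift, List.filterMap_map]
    have hfun : ((fun p : Int × String => if pvS p.2 = true then some p.1 else none) ∘
        fun p : Int × String => (p.1 + 1, p.2)) =
        (fun p : Int × String => ((fun p : Int × String => if pvS p.2 = true then some p.1 else none) p).map (· + 1)) := by
      funext p
      by_cases hs : pvS p.2 = true <;> simp [hs]
    rw [hfun, ← List.map_filterMap, ih]
    by_cases h : pvS l = true <;> simp [h, pvIdxs]

theorem portB_eq_pvB (issue : String) :
    extract_findings_from_issue_py_alt issue = pvB (PySem.Str.splitlines issue) := by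
  have key : ∀ (L : List String),
      (PySem.List.enumerate ((PySem.List.enumerate L).filterMap
          (fun p => if pvS p.2 = true then some p.1 else none))).map (fun q =>
        (q.1, PySem.Str.join "\n" (PySem.List.slice L (some q.2)
          (some ((PySem.List.pyGet? ((PySem.List.enumerate L).filterMap
            (fun p => if pvS p.2 = true then some p.1 else none)) (q.1 + 1)).getD
              (L.length : Int)))))) = pvB L := by
    intro L
    rw [idxsOf_eq]
    unfold pvB
    apply List.ext_getElem
    · simp [PySem.List.length_enumerate]
    · intro j h1 h2
      rw [List.getElem_map, List.getElem_map, PySem.List.getElem_enumerate]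
      have hj : j < (pvIdxs L).length := by
        simpa [PySem.List.length_enumerate] using h1
      simp only [List.getElem_map, List.getElem_zipIdx, zero_add]
      have hget : PySem.List.pyGet? ((pvIdxs L).map (fun n : Nat => (n : Int))) ((j : Int) + 1) =
          ((pvIdxs L)[j + 1]?).map (fun n : Nat => (n : Int)) := by
        rw [show ((j : Int) + 1) = ((j + 1 : Nat) : Int) from by push_cast; ring]
        rw [PySem.List.pyGet?_natCast, List.getElem?_map]
      rw [hget]
      cases hopt : (pvIdxs L)[j + 1]? with
      | none =>
        simp only [Option.map_none, Option.getD_none]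
        rw [PySem.List.slice_natCast]
      | some e =>
        simp only [Option.map_some, Option.getD_some]
        rw [PySem.List.slice_natCast]
  exact key (PySem.Str.splitlines issue)

theorem take_headD (ls : List String) :
    ls.take ((pvIdxs ls).headD ls.length) = ls.takeWhile (fun x => !pvS x) := by
  induction ls with
  | nil => simp
  | cons x xs ih =>
    by_cases hx : pvS x = true
    · simp [pvIdxs, hx]
    · simp only [Bool.not_eq_true] at hx
      simp only [pvIdxs, hx, Bool.false_eq_true, if_false]
      rw [List.takeWhile_cons]
      simp only [hx, Bool.not_false, if_true]
      have hhead : ((pvIdxs xs).map (· + 1)).headD (x :: xs).length = (pvIdxs xs).headD xs.length + 1 := by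
        cases pvIdxs xs <;> simp
      rw [hhead, List.take_succ_cons, ih]

theorem pvEntry_shift (l : String) (ls : List String) (a j : Nat) :
    PySem.Str.join "\n" (((l :: ls).drop (a + 1)).take
        ((((pvIdxs ls).map (· + 1))[j + 1]?).getD (l :: ls).length - (a + 1))) =
      PySem.Str.join "\n" ((ls.drop a).take (((pvIdxs ls)[j + 1]?).getD ls.length - a)) := by
  rw [List.drop_succ_cons, List.getElem?_map]
  cases hopt : (pvIdxs ls)[j + 1]? <;> simp [Nat.succ_sub_succ]

theorem pvB_eq (ls : List String) :
    pvB ls = (pvNum 0 (pvChunks ls)).map (fun p => (p.1, PySem.Str.join "\n" p.2)) := by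
  induction ls with
  | nil => simp [pvB, pvIdxs, pvChunks_nil, pvNum]
  | cons l ls ih =>
    by_cases hl : pvS l = true
    · have hidx : pvIdxs (l :: ls) = 0 :: (pvIdxs ls).map (· + 1) := by
        simp [pvIdxs, hl]
      conv_rhs => rw [pvChunks]
      simp only [hl, if_true, pvNum, List.map_cons]
      rw [pvNum_shift, pvChunks_dropWhile]
      have hRtail : (List.map (fun p => (p.1 + 1, p.2)) (pvNum 0 (pvChunks ls))).map
          (fun p : Int × List String => (p.1, PySem.Str.join "\n" p.2)) =
          (pvB ls).map (fun r => (r.1 + 1, r.2)) := by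
        rw [ih, List.map_map, List.map_map]
        rfl
      rw [hRtail]
      unfold pvB
      rw [hidx, List.zipIdx_cons, List.zipIdx_succ, List.zipIdx_map, List.map_cons,
        List.map_map, List.map_map, List.map_map]
      congr 1
      · -- head entry
        have hstop : ((0 :: (pvIdxs ls).map (· + 1))[0 + 1]?).getD (l :: ls).length =
            (pvIdxs ls).headD ls.length + 1 := by
          rw [List.getElem?_cons_succ, List.getElem?_map]
          cases pvIdxs ls <;> simp
        simp only [List.drop_zero, Nat.sub_zero, hstop]
        rw [List.take_succ_cons, take_headD]
        simp
      · -- tail entries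
        apply List.map_congr_left
        intro q _
        obtain ⟨a, j⟩ := q
        simp only [Function.comp_def, Prod.map]
        have hstop : ((0 :: (pvIdxs ls).map (· + 1))[(j + 1) + 1]?) =
            ((pvIdxs ls).map (· + 1))[j + 1]? := List.getElem?_cons_succ
        simp only [id, hstop]
        rw [pvEntry_shift]
        simp only [Prod.mk.injEq]
        constructor
        · push_cast; ring
        · trivial
    · have hidx : pvIdxs (l :: ls) = (pvIdxs ls).map (· + 1) := by
        simp only [Bool.not_eq_true] at hl
        simp [pvIdxs, hl]
      have hch : pvChunks (l :: ls) = pvChunks ls := by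
        rw [pvChunks]
        simp only [Bool.not_eq_true] at hl
        simp [hl]
      rw [hch, ← ih]
      unfold pvB
      rw [hidx, List.zipIdx_map, List.map_map]
      apply List.map_congr_left
      intro q _
      obtain ⟨a, j⟩ := q
      simp only [Function.comp_def, Prod.map, id]
      rw [pvEntry_shift]

-- ===== VERDICT (by name: the statement is the Claim_ definition above) =====
theorem extract_findings_from_issue_py_spec : Claim_equal_extract_findings_from_issue_py := by
  intro issue _
  unfold Spec_extract_findings_from_issue_py
  rw [portA_eq, portB_eq_pvB, pvB_eq]
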